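-- pv_equiv track=rewrite | github.com/YallaPapi/pubscrape | src/agents/domain_classifier_agent.py | _categorize_exclusion_reason
-- ===== SOURCE A (Python) =====
-- def _categorize_exclusion_reason(reason: str) -> str:
--     """Categorize exclusion reasons into broader categories"""
--     reason_lower = reason.lower()
--
--     if any(keyword in reason_lower for keyword in ["timeout", "connection", "network"]):
--         return "connectivity_issues"
--     elif any(keyword in reason_lower for keyword in ["http", "404", "500", "error"]):
--         return "http_errors"
--     elif any(keyword in reason_lower for keyword in ["scoring", "business", "low_score"]):
--         return "quality_filtering"
--     elif any(keyword in reason_lower for keyword in ["platform", "detection"]):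
--         return "platform_detection_issues"
--     elif any(keyword in reason_lower for keyword in ["personal", "blog", "spam"]):
--         return "content_filtering"
--     else:
--         return "other"
-- ===== SOURCE B (Python) =====
-- _CATEGORY_NAMES = ["connectivity_issues", "http_errors", "quality_filtering",
--                    "platform_detection_issues", "content_filtering"]
--
-- _RANKED_KEYWORDS = (("timeout", "connection", "network"),
--                     ("http", "404", "500", "error"),
--                     ("scoring", "business", "low_score"),
--                     ("platform", "detection"),
--                     ("personal", "blog", "spam"))
--
--
-- def _rank_at(s, i):
--     """Best (smallest) category rank of a keyword anchored at position i, else 5."""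
--     for rank, kws in enumerate(_RANKED_KEYWORDS):
--         if s.startswith(kws, i):
--             return rank
--     return 5
--
--
-- def _categorize_exclusion_reason(reason: str) -> str:
--     """Categorize exclusion reasons into broader categories.
--
--     Single left-to-right scan over the lowercased reason: at each position take
--     the best-priority keyword anchored there and keep the minimum rank seen,
--     instead of running one whole-string substring search per keyword."""
--     s = reason.lower()
--     best = 5
--     for i in range(len(s)):
--         r = _rank_at(s, i)
--         if r < best:
--             best = r
--     return _CATEGORY_NAMES[best] if best < 5 else "other"
-- ===== Notes on version B (the rewrite author's own statement) =====
-- stated objective: alternative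
-- what changed: Instead of one whole-string substring search per keyword in an if/elif cascade, B makes a single left-to-right scan over the lowercased reason, at each position matching the keywords anchored there and keeping the minimum category rank seen.
import Mathlib
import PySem

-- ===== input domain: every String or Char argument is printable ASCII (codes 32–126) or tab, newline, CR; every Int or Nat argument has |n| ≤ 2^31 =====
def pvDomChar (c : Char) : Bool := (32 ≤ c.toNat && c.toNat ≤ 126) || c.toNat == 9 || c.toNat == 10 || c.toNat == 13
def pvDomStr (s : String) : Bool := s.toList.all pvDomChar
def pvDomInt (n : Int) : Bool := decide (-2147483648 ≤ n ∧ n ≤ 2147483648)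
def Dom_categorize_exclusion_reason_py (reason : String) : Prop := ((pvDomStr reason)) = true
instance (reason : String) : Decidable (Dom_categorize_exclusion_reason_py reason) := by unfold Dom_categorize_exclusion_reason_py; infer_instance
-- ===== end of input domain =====

-- B replaces A's per-keyword whole-string searches and if/elif cascade with one
-- left-to-right scan that matches keywords anchored at each position and keeps
-- the minimum category rank; same value everywhere (alternative algorithm).

-- ===== PORT A =====
def categorize_exclusion_reason_py (reason : String) : String :=
  let reason_lower := PySem.Str.lower reason
  if ["timeout", "connection", "network"].any (fun kw => PySem.Str.isIn kw reason_lower) then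
    "connectivity_issues"
  else if ["http", "404", "500", "error"].any (fun kw => PySem.Str.isIn kw reason_lower) then
    "http_errors"
  else if ["scoring", "business", "low_score"].any (fun kw => PySem.Str.isIn kw reason_lower) then
    "quality_filtering"
  else if ["platform", "detection"].any (fun kw => PySem.Str.isIn kw reason_lower) then
    "platform_detection_issues"
  else if ["personal", "blog", "spam"].any (fun kw => PySem.Str.isIn kw reason_lower) then
    "content_filtering"
  else
    "other"

-- ===== PORT B =====
-- strings are handled as List Char (PySem.Chars is exact on the ASCII domain)
def categoryNames : List String :=
  ["connectivity_issues", "http_errors", "quality_filtering",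
   "platform_detection_issues", "content_filtering"]

def rankedKeywords : List (List (List Char)) :=
  [["timeout".toList, "connection".toList, "network".toList],
   ["http".toList, "404".toList, "500".toList, "error".toList],
   ["scoring".toList, "business".toList, "low_score".toList],
   ["platform".toList, "detection".toList],
   ["personal".toList, "blog".toList, "spam".toList]]

-- _rank_at: the for-loop over enumerate(_RANKED_KEYWORDS); s.startswith(kws, i)
-- is the anchored test on the suffix s[i:], which the scan below carries directly
def rankAtGo (tbl : List (List (List Char))) (rank : Nat) (suf : List Char) : Nat :=
  match tbl with
  | [] => 5
  | kws :: rest =>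
      if kws.any (fun kw => PySem.Chars.startswith suf kw) then rank
      else rankAtGo rest (rank + 1) suf

def rankAt (suf : List Char) : Nat := rankAtGo rankedKeywords 0 suf

-- the 'for i in range(len(s))' loop: structural recursion over the suffixes s[i:]
def scanBest (s : List Char) (best : Nat) : Nat :=
  match s with
  | [] => best
  | _ :: t =>
      let r := rankAt s
      scanBest t (if r < best then r else best)

def categorize_exclusion_reason_py_alt (reason : String) : String :=
  let s := (PySem.Str.lower reason).toList
  let best := scanBest s 5
  if best < 5 then categoryNames.getD best "other" else "other"

-- ===== PRECONDITION & SPEC =====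
def Spec_categorize_exclusion_reason_py (reason : String) (out : String) : Prop := out = categorize_exclusion_reason_py_alt reason
instance (reason : String) (out : String) : Decidable (Spec_categorize_exclusion_reason_py reason out) := by unfold Spec_categorize_exclusion_reason_py; infer_instance

-- ===== CLAIM (what is proved, stated in full; the proofs are below) =====
def Claim_equal_categorize_exclusion_reason_py : Prop := ∀ (reason : String), Dom_categorize_exclusion_reason_py reason → Spec_categorize_exclusion_reason_py reason (categorize_exclusion_reason_py reason)

-- ===== LEMMAS AND PROOFS =====

-- A's cascade, phrased as a rank over a char list: the least rank whose keyword
-- group has an infix match, 5 if none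
def inRank (k : Nat) (s : List Char) : Bool :=
  (rankedKeywords.getD k []).any (fun kw => PySem.Chars.isIn kw s)

def aRank (s : List Char) : Nat :=
  if inRank 0 s then 0 else if inRank 1 s then 1 else if inRank 2 s then 2
  else if inRank 3 s then 3 else if inRank 4 s then 4 else 5

theorem rankAt_le (s : List Char) : rankAt s ≤ 5 := by
  simp only [rankAt, rankedKeywords, rankAtGo]
  split_ifs <;> omega

theorem aRank_le (s : List Char) : aRank s ≤ 5 := by
  unfold aRank; split_ifs <;> omega

theorem inRank_cons (k : Nat) (c : Char) (t : List Char) :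
    inRank k (c :: t) =
      ((rankedKeywords.getD k []).any (fun kw => PySem.Chars.startswith (c :: t) kw)
        || inRank k t) := by
  unfold inRank
  rw [Bool.eq_iff_iff]
  simp only [List.any_eq_true, Bool.or_eq_true, PySem.Chars.isIn_iff_infix,
    PySem.Chars.startswith_iff, List.infix_cons_iff]
  constructor
  · rintro ⟨kw, hm, h | h⟩
    · exact Or.inl ⟨kw, hm, h⟩
    · exact Or.inr ⟨kw, hm, h⟩
  · rintro (⟨kw, hm, h⟩ | ⟨kw, hm, h⟩)
    · exact ⟨kw, hm, Or.inl h⟩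
    · exact ⟨kw, hm, Or.inr h⟩

-- pure Boolean fact behind aRank_cons: a cascade over pointwise-or'ed conditions
-- is the min of the two cascades
theorem min_cascade (p0 p1 p2 p3 p4 m0 m1 m2 m3 m4 : Bool) :
    (if (p0 || m0) = true then (0 : Nat) else if (p1 || m1) = true then 1
      else if (p2 || m2) = true then 2 else if (p3 || m3) = true then 3
      else if (p4 || m4) = true then 4 else 5)
    = min (if p0 = true then (0 : Nat) else if p1 = true then 1 else if p2 = true then 2
             else if p3 = true then 3 else if p4 = true then 4 else 5)
          (if m0 = true then (0 : Nat) else if m1 = true then 1 else if m2 = true then 2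
             else if m3 = true then 3 else if m4 = true then 4 else 5) := by
  revert p0 p1 p2 p3 p4 m0 m1 m2 m3 m4; decide

theorem aRank_cons (c : Char) (t : List Char) :
    aRank (c :: t) = min (rankAt (c :: t)) (aRank t) := by
  unfold aRank
  rw [inRank_cons, inRank_cons, inRank_cons, inRank_cons, inRank_cons]
  simp only [rankAt, rankedKeywords, rankAtGo, List.getD, List.getElem?_cons_zero,
    List.getElem?_cons_succ, Option.getD_some, Nat.reduceAdd, Nat.zero_add]
  exact min_cascade _ _ _ _ _ _ _ _ _ _

theorem scanBest_eq (s : List Char) : ∀ b, b ≤ 5 → scanBest s b = min b (aRank s) := by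
  induction s with
  | nil =>
      intro b hb
      have h : aRank [] = 5 := by decide
      rw [h]; simp only [scanBest]; omega
  | cons c t ih =>
      intro b hb
      have hr := rankAt_le (c :: t)
      have ht := aRank_le t
      simp only [scanBest]
      rw [aRank_cons]
      by_cases hrb : rankAt (c :: t) < b
      · rw [if_pos hrb, ih _ (by omega)]; omega
      · rw [if_neg hrb, ih _ hb]; omega

-- ===== VERDICT (by name: the statement is the Claim_ definition above) =====
theorem categorize_exclusion_reason_py_spec : Claim_equal_categorize_exclusion_reason_py := by
  intro reason _
  unfold Spec_categorize_exclusion_reason_py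
  simp only [categorize_exclusion_reason_py, categorize_exclusion_reason_py_alt]
  rw [scanBest_eq _ 5 (by omega)]
  have h := aRank_le ((PySem.Str.lower reason).toList)
  rw [Nat.min_eq_right h]
  unfold aRank inRank
  simp only [rankedKeywords, categoryNames, List.getD, List.getElem?_cons_zero,
    List.getElem?_cons_succ, Option.getD_some, List.any_cons, List.any_nil,
    PySem.Str.isIn_eq, Bool.or_eq_true, Bool.or_false]
  split_ifs <;> simp_all
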